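-- pv_equiv track=rewrite | github.com/ptbarros/dollar-bill-processor | pattern_engine_v2.py | _check_three_pairs
-- ===== SOURCE A (Python) =====
-- def _check_three_pairs(digits: str) -> bool:
--     """Contains at least 3 pairs."""
--     if len(digits) != 8:
--         return False
--     pair_count = 0
--     i = 0
--     while i < 7:
--         if digits[i] == digits[i+1]:
--             pair_count += 1
--             i += 2
--         else:
--             i += 1
--     return pair_count >= 3
-- ===== SOURCE B (Python) =====
-- def _check_three_pairs(digits: str) -> bool:
--     """Contains at least 3 pairs."""
--     if len(digits) != 8:
--         return False
--
--     def pairs(s):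
--         if len(s) < 2:
--             return 0
--         if s[0] == s[1]:
--             return 1 + pairs(s[2:])
--         return pairs(s[1:])
--
--     return pairs(digits) >= 3
-- ===== Notes on version B (the rewrite author's own statement) =====
-- stated objective: simpler
-- what changed: Replaces the index-based while loop with mutable counter/cursor by a direct structural recursion on the string suffix that counts greedy non-overlapping adjacent pairs.
import Mathlib
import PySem

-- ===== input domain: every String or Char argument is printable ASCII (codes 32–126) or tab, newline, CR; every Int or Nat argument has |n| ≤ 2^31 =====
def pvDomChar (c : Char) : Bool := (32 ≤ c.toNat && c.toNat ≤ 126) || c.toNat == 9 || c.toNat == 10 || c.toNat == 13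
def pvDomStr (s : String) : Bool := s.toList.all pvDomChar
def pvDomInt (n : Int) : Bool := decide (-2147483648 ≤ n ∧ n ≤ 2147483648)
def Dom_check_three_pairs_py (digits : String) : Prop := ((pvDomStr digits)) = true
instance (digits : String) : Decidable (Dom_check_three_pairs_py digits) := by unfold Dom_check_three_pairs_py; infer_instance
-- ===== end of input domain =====

-- B replaces A's index-walking while loop (mutable counter and cursor) by a structural
-- recursion on the string suffix; same greedy pair count, simpler decomposition.

-- ===== PORT A =====
-- while loop of A: i < 7; digits[i] == digits[i+1] is in range (len = 8, 0 ≤ i < 7),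
-- so the indexing is exactly `l[i]?` on the char list (both sides are `some _`).
def pvLoopA (l : List Char) (pair_count i : Nat) : Nat :=
  if _h : i < 7 then
    if l[i]? = l[i+1]? then pvLoopA l (pair_count + 1) (i + 2)
    else pvLoopA l pair_count (i + 1)
  else pair_count
termination_by 7 - i

def check_three_pairs_py (digits : String) : Bool :=
  if PySem.Str.len digits ≠ 8 then false
  else decide (3 ≤ pvLoopA digits.toList 0 0)

-- ===== PORT B =====
-- helper `pairs` of Source B: recursion on the suffix, s[2:] / s[1:] are the tails.
def pvPairsB : List Char → Nat
  | a :: b :: t => if a = b then 1 + pvPairsB t else pvPairsB (b :: t)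
  | _ => 0

def check_three_pairs_py_alt (digits : String) : Bool :=
  if PySem.Str.len digits ≠ 8 then false
  else decide (3 ≤ pvPairsB digits.toList)

-- ===== PRECONDITION & SPEC =====
def Spec_check_three_pairs_py (digits : String) (out : Bool) : Prop := out = check_three_pairs_py_alt digits
instance (digits : String) (out : Bool) : Decidable (Spec_check_three_pairs_py digits out) := by unfold Spec_check_three_pairs_py; infer_instance

-- ===== CLAIM (what is proved, stated in full; the proofs are below) =====
def Claim_equal_check_three_pairs_py : Prop := ∀ (digits : String), Dom_check_three_pairs_py digits → Spec_check_three_pairs_py digits (check_three_pairs_py digits)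

-- ===== LEMMAS AND PROOFS =====

theorem pvLoopA_eq (l : List Char) (i pc : Nat) (hl : l.length = 8) :
    pvLoopA l pc i = pc + pvPairsB (l.drop i) := by
  by_cases h : i < 7
  · obtain ⟨a, b, t, ht⟩ : ∃ a b t, l.drop i = a :: b :: t := by
      have hlen : (l.drop i).length = 8 - i := by simp [hl]
      match hdrop : l.drop i with
      | [] => rw [hdrop] at hlen; simp at hlen; omega
      | [x] => rw [hdrop] at hlen; simp at hlen; omega
      | a :: b :: t => exact ⟨a, b, t, rfl⟩
    have ha : l[i]? = some a := by
      have h0 := congrArg (fun s => s[0]?) ht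
      simpa [List.getElem?_drop] using h0
    have hb : l[i+1]? = some b := by
      have h1 := congrArg (fun s => s[1]?) ht
      simpa [List.getElem?_drop] using h1
    have ht2 : l.drop (i + 2) = t := by
      have h2 := congrArg (List.drop 2) ht
      simpa [List.drop_drop] using h2
    have ht1 : l.drop (i + 1) = b :: t := by
      have h1 := congrArg (List.drop 1) ht
      simpa [List.drop_drop] using h1
    rw [pvLoopA, dif_pos h, ha, hb, ht]
    by_cases hab : a = b
    · rw [if_pos (by rw [hab]), pvLoopA_eq l (i + 2) (pc + 1) hl, ht2]
      simp [pvPairsB, hab]; omega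
    · rw [if_neg (by simpa using hab), pvLoopA_eq l (i + 1) pc hl, ht1]
      simp [pvPairsB, hab]
  · rw [pvLoopA, dif_neg h]
    have hz : pvPairsB (l.drop i) = 0 := by
      have hlen : (l.drop i).length = 8 - i := by simp [hl]
      match hdrop : l.drop i with
      | [] => simp [pvPairsB]
      | [x] => simp [pvPairsB]
      | a :: b :: t => rw [hdrop] at hlen; simp at hlen; omega
    rw [hz]; omega
termination_by 7 - i

-- ===== VERDICT (by name: the statement is the Claim_ definition above) =====
theorem check_three_pairs_py_spec : Claim_equal_check_three_pairs_py := by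
  intro digits _
  unfold Spec_check_three_pairs_py check_three_pairs_py check_three_pairs_py_alt
  by_cases hl : PySem.Str.len digits ≠ 8
  · rw [if_pos hl, if_pos hl]
  · rw [if_neg hl, if_neg hl]
    have h8 : digits.toList.length = 8 := by
      simp [PySem.Str.len] at hl ⊢
      omega
    rw [pvLoopA_eq digits.toList 0 0 h8]
    simp
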